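-- pv_equiv track=rewrite | github.com/uzh-rpg/hybrid_ann_snn | h36m_dataset_generate/single_run_scripts/crop_scale_video.py | get_subject_txt_file
-- ===== SOURCE A (Python) =====
-- def get_subject_txt_file(lines, subject):
--     subject = subject + ' '
--     subject_lines = []
--     subject_found = False
--     for line in lines:
--         if subject in line:
--             subject_lines.append(line)
--             if subject_found != True:
--                 subject_found = True
--         else:
--             if subject_found:
--                 return subject_lines
--
--     return subject_lines
-- ===== SOURCE B (Python) =====
-- def get_subject_txt_file(lines, subject):
--     needle = subject + ' '
--     hits = [needle in line for line in lines]
--     if True not in hits: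
--         return []
--     start = hits.index(True)
--     tail = hits[start:]
--     if False in tail:
--         end = start + tail.index(False)
--     else:
--         end = len(lines)
--     return lines[start:end]
-- ===== Notes on version B (the rewrite author's own statement) =====
-- stated objective: alternative
-- what changed: Replaces A's flag state machine accumulating lines one by one with a mask-and-slice approach: build a boolean hit mask, locate the block's start and end by index arithmetic on the mask, and return a single slice of lines.
import Mathlib
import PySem

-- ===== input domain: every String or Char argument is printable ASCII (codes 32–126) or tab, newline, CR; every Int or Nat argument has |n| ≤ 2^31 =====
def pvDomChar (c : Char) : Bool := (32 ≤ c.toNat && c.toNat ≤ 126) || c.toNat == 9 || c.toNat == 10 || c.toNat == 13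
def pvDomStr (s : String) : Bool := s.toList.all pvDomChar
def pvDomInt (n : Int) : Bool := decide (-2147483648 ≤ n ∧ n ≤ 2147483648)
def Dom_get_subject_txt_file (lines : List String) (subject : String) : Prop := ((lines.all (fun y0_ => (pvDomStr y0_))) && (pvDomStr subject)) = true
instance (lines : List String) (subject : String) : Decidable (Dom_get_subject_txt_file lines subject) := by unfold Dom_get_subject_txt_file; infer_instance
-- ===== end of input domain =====

-- B replaces A's flag state machine (accumulating lines one by one) with a mask-and-slice
-- formulation: a boolean hit mask, start/end indices found on the mask, one slice of lines
-- (objective: alternative); return values are proved equal on all inputs.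

-- ===== PORT A =====
-- A's for-loop with the accumulator subject_lines and the subject_found flag,
-- including the early return when a non-matching line follows the block.
def pvGoA (needle : String) : List String → List String → Bool → List String
  | [], subject_lines, _ => subject_lines
  | line :: rest, subject_lines, subject_found =>
    if PySem.Str.isIn needle line then
      pvGoA needle rest (subject_lines ++ [line]) true
    else
      if subject_found then subject_lines
      else pvGoA needle rest subject_lines subject_found

def get_subject_txt_file (lines : List String) (subject : String) : List String :=
  pvGoA (subject ++ " ") lines [] false

-- ===== PORT B =====
-- Source B step for step, given the mask 'hits = [needle in line for line in lines]':
-- 'True not in hits' / 'hits.index(True)' are together PySem.List.index?, likewise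
-- 'False in tail' / 'tail.index(False)'; then the single slice lines[start:end].
def pvMask (p : String → Bool) (lines : List String) : List String :=
  match PySem.List.index? (lines.map p) true with
  | none => []
  | some start =>
    match PySem.List.index? (PySem.List.slice (lines.map p) (some (start : Int)) none) false with
    | none => PySem.List.slice lines (some (start : Int)) (some (lines.length : Int))
    | some k => PySem.List.slice lines (some (start : Int)) (some ((start + k : Nat) : Int))

def get_subject_txt_file_alt (lines : List String) (subject : String) : List String :=
  pvMask (fun line => PySem.Str.isIn (subject ++ " ") line) lines

-- ===== PRECONDITION & SPEC =====
def Spec_get_subject_txt_file (lines : List String) (subject : String) (out : List String) : Prop := out = get_subject_txt_file_alt lines subject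
instance (lines : List String) (subject : String) (out : List String) : Decidable (Spec_get_subject_txt_file lines subject out) := by unfold Spec_get_subject_txt_file; infer_instance

-- ===== CLAIM =====
def Claim_equal_get_subject_txt_file : Prop := ∀ (lines : List String) (subject : String), Dom_get_subject_txt_file lines subject → Spec_get_subject_txt_file lines subject (get_subject_txt_file lines subject)

-- ===== LEMMAS AND PROOFS =====
-- takeWhile is a take at the first false of the mask
theorem takeWhile_eq_take_index (p : String → Bool) (ls : List String) :
    ls.takeWhile p = ls.take ((PySem.List.index? (ls.map p) false).getD ls.length) := by
  induction ls with
  | nil => rfl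
  | cons l rest ih =>
    cases hp : p l with
    | false =>
      rw [List.map_cons, hp, PySem.List.index?_cons_self]
      simp [hp]
    | true =>
      have hne : p l ≠ false := by simp [hp]
      rw [List.map_cons, PySem.List.index?_cons_of_ne _ hne]
      cases hidx : PySem.List.index? (rest.map p) false with
      | none =>
        rw [hidx] at ih
        simp [hp, ih]
      | some k =>
        rw [hidx] at ih
        simp [hp, ih]

-- B's mask-and-slice computation is takeWhile-after-dropWhile
theorem pvMask_eq (p : String → Bool) (ls : List String) :
    pvMask p ls = (ls.dropWhile (fun l => !(p l))).takeWhile p := by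
  induction ls with
  | nil => rfl
  | cons l rest ih =>
    unfold pvMask
    cases hp : p l with
    | true =>
      have hstart : PySem.List.index? ((l :: rest).map p) true = some 0 := by
        rw [List.map_cons, hp, PySem.List.index?_cons_self]
      rw [hstart, List.dropWhile_cons]
      simp only [hp, Bool.not_true, Bool.false_eq_true, if_false]
      rw [takeWhile_eq_take_index p (l :: rest)]
      cases hend : PySem.List.index? ((l :: rest).map p) false with
      | none =>
        simp only [Nat.cast_zero, PySem.List.slice_zero_start, PySem.List.slice_none_none, hend]
        rw [PySem.List.slice_to _ (by positivity)]
        simp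
      | some k =>
        simp only [Nat.cast_zero, PySem.List.slice_zero_start, PySem.List.slice_none_none, hend,
          Nat.zero_add]
        rw [PySem.List.slice_to _ (by positivity)]
        simp
    | false =>
      have hstart : PySem.List.index? ((l :: rest).map p) true
          = Option.map (· + 1) (PySem.List.index? (rest.map p) true) := by
        rw [List.map_cons]
        exact PySem.List.index?_cons_of_ne _ (by simp [hp])
      rw [hstart, List.dropWhile_cons]
      simp only [hp, Bool.not_false, if_true]
      rw [← ih]
      unfold pvMask
      cases hs : PySem.List.index? (rest.map p) true with
      | none => simp
      | some s =>
        simp only [Option.map_some]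
        have hdropL : PySem.List.slice ((l :: rest).map p) (some ((s + 1 : Nat) : Int)) none
            = List.drop s (rest.map p) := by
          rw [List.map_cons, PySem.List.slice_from_natCast, List.drop_succ_cons]
        have hdropR : PySem.List.slice (rest.map p) (some ((s : Nat) : Int)) none
            = List.drop s (rest.map p) := by
          rw [PySem.List.slice_from_natCast]
        rw [hdropL, hdropR]
        cases hk : PySem.List.index? (List.drop s (rest.map p)) false with
        | none =>
          show PySem.List.slice (l :: rest) (some ((s + 1 : Nat) : Int))
                (some (((l :: rest).length : Nat) : Int))
              = PySem.List.slice rest (some ((s : Nat) : Int)) (some ((rest.length : Nat) : Int))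
          rw [show (((l :: rest).length : Nat) : Int) = (((rest.length + 1 : Nat)) : Int) by simp,
            PySem.List.slice_natCast, PySem.List.slice_natCast, List.drop_succ_cons,
            show rest.length + 1 - (s + 1) = rest.length - s by omega]
        | some k =>
          show PySem.List.slice (l :: rest) (some ((s + 1 : Nat) : Int))
                (some ((s + 1 + k : Nat) : Int))
              = PySem.List.slice rest (some ((s : Nat) : Int)) (some ((s + k : Nat) : Int))
          rw [PySem.List.slice_natCast, PySem.List.slice_natCast, List.drop_succ_cons,
            show s + 1 + k - (s + 1) = s + k - s by omega]

-- once the flag is set, A's loop collects exactly the leading matching lines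
theorem pvGoA_true_eq_takeWhile (needle : String) (ls acc : List String) :
    pvGoA needle ls acc true = acc ++ ls.takeWhile (fun l => PySem.Str.isIn needle l) := by
  induction ls generalizing acc with
  | nil => simp [pvGoA]
  | cons l rest ih =>
    cases hp : PySem.Str.isIn needle l with
    | true =>
      simp only [pvGoA, hp, if_true, List.takeWhile_cons, ih]
      simp
    | false =>
      simp only [pvGoA, hp, Bool.false_eq_true, if_false, if_true, List.takeWhile_cons]
      simp

-- before the flag is set, A's loop is dropWhile-then-takeWhile
theorem pvGoA_false_eq (needle : String) (ls : List String) :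
    pvGoA needle ls [] false
      = (ls.dropWhile (fun l => !(PySem.Str.isIn needle l))).takeWhile
          (fun l => PySem.Str.isIn needle l) := by
  induction ls with
  | nil => rfl
  | cons l rest ih =>
    cases hp : PySem.Str.isIn needle l with
    | true =>
      simp only [pvGoA, hp, if_true, List.dropWhile_cons, Bool.not_true, Bool.false_eq_true,
        if_false, List.takeWhile_cons]
      rw [pvGoA_true_eq_takeWhile]
      simp
    | false =>
      simp only [pvGoA, hp, Bool.false_eq_true, if_false, List.dropWhile_cons, Bool.not_false,
        if_true]
      exact ih

-- ===== VERDICT =====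
theorem get_subject_txt_file_spec : Claim_equal_get_subject_txt_file := by
  intro lines subject _
  unfold Spec_get_subject_txt_file get_subject_txt_file get_subject_txt_file_alt
  rw [pvGoA_false_eq, pvMask_eq]
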